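-- pv_equiv track=rewrite | github.com/BlackChina/fin_savvy_app | fin_savvy_app/budget_validate.py | duplicate_budget_lines_user_message
-- ===== SOURCE A (Python) =====
-- from collections import defaultdict
-- from typing import Any
--
-- def _row_key(category: str, other_detail: str | None) -> str:
--     c = (category or "").strip()
--     if c.lower() == "other":
--         od = (other_detail or "").strip().lower()
--         return f"other::{od}"
--     return f"cat::{c.lower()}"
--
-- def duplicate_budget_lines_user_message(submitted: list[dict[str, Any]]) -> str:
--     """
--     Explain which rows clash when two lines share the same category (or two Other lines share the same label).
--     """
--     groups: dict[str, list[str]] = defaultdict(list)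
--     for r in submitted:
--         cat = str(r.get("category") or "").strip()
--         if not cat:
--             continue
--         od_raw = str(r.get("other_detail") or "").strip()[:120]
--         od: str | None = od_raw if cat.lower() == "other" else None
--         if cat.lower() == "other" and not od:
--             continue
--         k = _row_key(cat, od)
--         if cat.lower() == "other":
--             label = od or ""
--             groups[k].append(f'Other ("{label}")')
--         else:
--             groups[k].append(cat)
--
--     dup_blocks: list[str] = []
--     for k, labels in sorted(groups.items(), key=lambda kv: kv[0]):
--         if len(labels) < 2:
--             continue
--         display = labels[0]
--         n = len(labels)
--         if k.startswith("other::"):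
--             dup_blocks.append(
--                 f"• {display}: {n} rows share this same Other label. Merge the amounts into one row, "
--                 "or type a different label on the extra row so each Other line is distinct."
--             )
--         else:
--             dup_blocks.append(
--                 f"• {display}: {n} rows list this category. Keep one row (merge limits into a single total if needed) "
--                 "or change one row to a different category."
--             )
--
--     if not dup_blocks:
--         return (
--             'Two or more lines use the same category, or two "Other" lines use the same label. '
--             "Each category is stored once; each Other label is stored once."
--         )
--
--     return (
--         "We could not save this budget because the same line appears more than once:\n\n"
--         + "\n".join(dup_blocks)
--     )
-- ===== SOURCE B (Python) =====
-- def duplicate_budget_lines_user_message(submitted):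
--     """
--     Explain which rows clash when two lines share the same category (or two Other lines share the same label).
--     """
--     rows = []
--     for r in submitted:
--         cat = str(r.get("category") or "").strip()
--         if not cat:
--             continue
--         low = cat.lower()
--         od = str(r.get("other_detail") or "").strip()[:120]
--         if low == "other":
--             if not od:
--                 continue
--             rows.append(("other::" + od.strip().lower(), f'Other ("{od}")'))
--         else:
--             rows.append(("cat::" + low, cat))
--
--     blocks = []
--     for k in sorted({key for key, _ in rows}):
--         grp = [d for kk, d in rows if kk == k]
--         n = len(grp)
--         if n >= 2:
--             display = grp[0]
--             if k.startswith("other::"):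
--                 blocks.append(
--                     f"• {display}: {n} rows share this same Other label. Merge the amounts into one row, "
--                     "or type a different label on the extra row so each Other line is distinct."
--                 )
--             else:
--                 blocks.append(
--                     f"• {display}: {n} rows list this category. Keep one row (merge limits into a single total if needed) "
--                     "or change one row to a different category."
--                 )
--
--     if not blocks:
--         return (
--             'Two or more lines use the same category, or two "Other" lines use the same label. '
--             "Each category is stored once; each Other label is stored once."
--         )
--     return (
--         "We could not save this budget because the same line appears more than once:\n\n"
--         + "\n".join(blocks)
--     )
-- ===== Notes on version B (the rewrite author's own statement) =====
-- stated objective: alternative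
-- what changed: Replaces A's defaultdict-of-label-lists grouping with a flat one-pass list of (key, display) tuples; the report phase iterates the sorted distinct keys and recovers each group's size and first display by filtering the flat list, so no dict of lists is ever built.
import Mathlib
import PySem

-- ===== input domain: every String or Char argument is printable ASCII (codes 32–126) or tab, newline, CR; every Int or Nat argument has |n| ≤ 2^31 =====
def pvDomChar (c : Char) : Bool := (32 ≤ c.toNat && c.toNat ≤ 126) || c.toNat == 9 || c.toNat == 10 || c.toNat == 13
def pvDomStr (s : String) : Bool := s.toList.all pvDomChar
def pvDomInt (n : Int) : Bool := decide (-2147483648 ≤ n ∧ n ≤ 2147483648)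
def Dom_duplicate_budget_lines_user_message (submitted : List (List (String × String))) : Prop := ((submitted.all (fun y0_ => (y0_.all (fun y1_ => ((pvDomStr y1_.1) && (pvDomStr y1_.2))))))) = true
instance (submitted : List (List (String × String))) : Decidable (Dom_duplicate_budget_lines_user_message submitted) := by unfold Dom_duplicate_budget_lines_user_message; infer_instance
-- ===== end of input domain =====

-- B replaces A's defaultdict-of-label-lists with a flat (key, display) tuple list whose sorted
-- distinct keys are each re-scanned by a filter for the group's size and first display ('alternative').

-- ===== PORT A =====
def pvRowKey (category : String) (other_detail : Option String) : String :=
  let c := PySem.Str.strip category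
  if PySem.Str.lower c = "other" then
    let od := PySem.Str.lower (PySem.Str.strip (other_detail.getD ""))
    "other::" ++ od
  else
    "cat::" ++ PySem.Str.lower c

def duplicate_budget_lines_user_message (submitted : List (List (String × String))) : String :=
  let groups : PySem.Dict String (List String) :=
    submitted.foldl (fun groups r =>
      let cat := PySem.Str.strip ((List.lookup "category" r).getD "")
      if cat = "" then groups
      else
        let od_raw := PySem.Str.slice (PySem.Str.strip ((List.lookup "other_detail" r).getD "")) none (some 120)
        let od : Option String := if PySem.Str.lower cat = "other" then some od_raw else none
        if PySem.Str.lower cat = "other" ∧ od.getD "" = "" then groups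
        else
          let k := pvRowKey cat od
          if PySem.Str.lower cat = "other" then
            let label := od.getD ""
            groups.modify k [] (fun ls => ls ++ ["Other (\"" ++ label ++ "\")"])
          else
            groups.modify k [] (fun ls => ls ++ [cat]))
      PySem.Dict.empty
  let dup_blocks : List String :=
    (PySem.List.sorted groups.items (fun kv => kv.1)).foldl (fun acc kv =>
      let k := kv.1
      let labels := kv.2
      if labels.length < 2 then acc
      else
        let display := PySem.List.pyGetD labels 0 ""
        let n : Int := labels.length
        if PySem.Str.startswith k "other::" then
          acc ++ ["• " ++ display ++ ": " ++ PySem.Int.toStr n ++ " rows share this same Other label. Merge the amounts into one row, or type a different label on the extra row so each Other line is distinct."]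
        else
          acc ++ ["• " ++ display ++ ": " ++ PySem.Int.toStr n ++ " rows list this category. Keep one row (merge limits into a single total if needed) or change one row to a different category."]) []
  if dup_blocks = [] then
    "Two or more lines use the same category, or two \"Other\" lines use the same label. Each category is stored once; each Other label is stored once."
  else
    "We could not save this budget because the same line appears more than once:\n\n" ++ PySem.Str.join "\n" dup_blocks

-- ===== PORT B =====
def duplicate_budget_lines_user_message_alt (submitted : List (List (String × String))) : String :=
  let rows : List (String × String) :=
    submitted.foldl (fun rows r =>
      let cat := PySem.Str.strip ((List.lookup "category" r).getD "")
      if cat = "" then rows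
      else
        let low := PySem.Str.lower cat
        let od := PySem.Str.slice (PySem.Str.strip ((List.lookup "other_detail" r).getD "")) none (some 120)
        if low = "other" then
          if od = "" then rows
          else rows ++ [("other::" ++ PySem.Str.lower (PySem.Str.strip od), "Other (\"" ++ od ++ "\")")]
        else
          rows ++ [("cat::" ++ low, cat)]) []
  let blocks : List String :=
    (PySem.List.sorted (PySem.Set.ofList (rows.map (fun p => p.1))) (fun x => x)).foldl (fun blocks k =>
      let grp := (rows.filter (fun p => p.1 == k)).map (fun p => p.2)
      let n := grp.length
      if 2 ≤ n then
        let display := PySem.List.pyGetD grp 0 ""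
        if PySem.Str.startswith k "other::" then
          blocks ++ ["• " ++ display ++ ": " ++ PySem.Int.toStr (n : Int) ++ " rows share this same Other label. Merge the amounts into one row, or type a different label on the extra row so each Other line is distinct."]
        else
          blocks ++ ["• " ++ display ++ ": " ++ PySem.Int.toStr (n : Int) ++ " rows list this category. Keep one row (merge limits into a single total if needed) or change one row to a different category."]
      else blocks) []
  if blocks = [] then
    "Two or more lines use the same category, or two \"Other\" lines use the same label. Each category is stored once; each Other label is stored once."
  else
    "We could not save this budget because the same line appears more than once:\n\n" ++ PySem.Str.join "\n" blocks

-- ===== PRECONDITION & SPEC =====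
def Spec_duplicate_budget_lines_user_message (submitted : List (List (String × String))) (out : String) : Prop := out = duplicate_budget_lines_user_message_alt submitted
instance (submitted : List (List (String × String))) (out : String) : Decidable (Spec_duplicate_budget_lines_user_message submitted out) := by unfold Spec_duplicate_budget_lines_user_message; infer_instance

-- ===== CLAIM (what is proved, stated in full; the proofs are below) =====
def Claim_equal_duplicate_budget_lines_user_message : Prop := ∀ (submitted : List (List (String × String))), Dom_duplicate_budget_lines_user_message submitted → Spec_duplicate_budget_lines_user_message submitted (duplicate_budget_lines_user_message submitted)

-- ===== LEMMAS AND PROOFS =====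

-- strip is idempotent (needed because A's _row_key strips the already-stripped category again)
theorem pv_lstrip_rstrip (x : List Char) (hx : PySem.Chars.lstrip x = x) :
    PySem.Chars.lstrip (PySem.Chars.rstrip x) = PySem.Chars.rstrip x := by
  unfold PySem.Chars.lstrip PySem.Chars.rstrip at *
  rcases h : (List.dropWhile PySem.Chars.isspace x.reverse).reverse with _ | ⟨c, t⟩
  · simp
  · have hpre : c :: t <+: x := by
      rw [← h]
      have : List.dropWhile PySem.Chars.isspace x.reverse <:+ x.reverse := List.dropWhile_suffix _
      simpa using this.reverse
    have hx' : x ≠ [] := by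
      intro he; rw [he] at hpre; simp at hpre
    have hc : x.head hx' = c := by
      rcases hpre with ⟨r, hr⟩
      subst hr
      simp
    have hnd : List.dropWhile PySem.Chars.isspace x ≠ [] := by rw [hx]; exact hx'
    have hp : PySem.Chars.isspace c = false := by
      have := List.head_dropWhile_not PySem.Chars.isspace hnd
      simpa [hx, hc] using this
    simp [hp]

theorem pv_strip_idem (s : List Char) : PySem.Chars.strip (PySem.Chars.strip s) = PySem.Chars.strip s := by
  have h1 : PySem.Chars.lstrip (PySem.Chars.lstrip s) = PySem.Chars.lstrip s := by
    unfold PySem.Chars.lstrip; exact List.dropWhile_idempotent _ _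
  show PySem.Chars.rstrip (PySem.Chars.lstrip (PySem.Chars.rstrip (PySem.Chars.lstrip s))) = _
  rw [pv_lstrip_rstrip _ h1]
  show PySem.Chars.rstrip (PySem.Chars.rstrip (PySem.Chars.lstrip s)) = PySem.Chars.rstrip (PySem.Chars.lstrip s)
  generalize PySem.Chars.lstrip s = y
  unfold PySem.Chars.rstrip
  rw [List.reverse_reverse, List.dropWhile_idempotent]

theorem pv_strip_idem_str (s : String) :
    PySem.Str.strip (PySem.Str.strip s) = PySem.Str.strip s := by
  have h : (PySem.Str.strip (PySem.Str.strip s)).toList = (PySem.Str.strip s).toList := by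
    simp [pv_strip_idem]
  exact String.toList_injective h

-- the per-row (key, display) entry both programs extract (none = the row is skipped)
def pvEntry? (r : List (String × String)) : Option (String × String) :=
  let cat := PySem.Str.strip ((List.lookup "category" r).getD "")
  if cat = "" then none
  else
    let od := PySem.Str.slice (PySem.Str.strip ((List.lookup "other_detail" r).getD "")) none (some 120)
    if PySem.Str.lower cat = "other" then
      if od = "" then none
      else some ("other::" ++ PySem.Str.lower (PySem.Str.strip od), "Other (\"" ++ od ++ "\")")
    else some ("cat::" ++ PySem.Str.lower cat, cat)

theorem pv_a_step (d : PySem.Dict String (List String)) (r : List (String × String)) :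
    (let cat := PySem.Str.strip ((List.lookup "category" r).getD "")
     if cat = "" then d
     else
       let od_raw := PySem.Str.slice (PySem.Str.strip ((List.lookup "other_detail" r).getD "")) none (some 120)
       let od : Option String := if PySem.Str.lower cat = "other" then some od_raw else none
       if PySem.Str.lower cat = "other" ∧ od.getD "" = "" then d
       else
         let k := pvRowKey cat od
         if PySem.Str.lower cat = "other" then
           let label := od.getD ""
           d.modify k [] (fun ls => ls ++ ["Other (\"" ++ label ++ "\")"])
         else
           d.modify k [] (fun ls => ls ++ [cat]))
    = (match pvEntry? r with
       | none => d
       | some p => d.modify p.1 [] (fun x => x ++ [p.2])) := by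
  unfold pvEntry? pvRowKey
  have hcat : PySem.Str.strip (PySem.Str.strip ((List.lookup "category" r).getD "")) = PySem.Str.strip ((List.lookup "category" r).getD "") := pv_strip_idem_str _
  dsimp only
  by_cases h1 : PySem.Str.strip ((List.lookup "category" r).getD "") = ""
  · simp [h1]
  · by_cases h2 : PySem.Str.lower (PySem.Str.strip ((List.lookup "category" r).getD "")) = "other"
    · by_cases h3 : PySem.Str.slice (PySem.Str.strip ((List.lookup "other_detail" r).getD "")) none (some 120) = ""
      · simp [h1, h2, h3]
      · simp [h1, h2, h3, hcat]
    · simp [h1, h2, hcat]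

theorem pv_b_step (acc : List (String × String)) (r : List (String × String)) :
    (let cat := PySem.Str.strip ((List.lookup "category" r).getD "")
     if cat = "" then acc
     else
       let low := PySem.Str.lower cat
       let od := PySem.Str.slice (PySem.Str.strip ((List.lookup "other_detail" r).getD "")) none (some 120)
       if low = "other" then
         if od = "" then acc
         else acc ++ [("other::" ++ PySem.Str.lower (PySem.Str.strip od), "Other (\"" ++ od ++ "\")")]
       else
         acc ++ [("cat::" ++ low, cat)])
    = acc ++ (pvEntry? r).toList := by
  unfold pvEntry?
  dsimp only
  by_cases h1 : PySem.Str.strip ((List.lookup "category" r).getD "") = ""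
  · simp [h1]
  · by_cases h2 : PySem.Str.lower (PySem.Str.strip ((List.lookup "category" r).getD "")) = "other"
    · by_cases h3 : PySem.Str.slice (PySem.Str.strip ((List.lookup "other_detail" r).getD "")) none (some 120) = ""
      · simp [h1, h2, h3]
      · simp [h1, h2, h3]
    · simp [h1, h2]

theorem pv_a_fold (l : List (List (String × String))) (d : PySem.Dict String (List String)) :
    l.foldl (fun groups r =>
      let cat := PySem.Str.strip ((List.lookup "category" r).getD "")
      if cat = "" then groups
      else
        let od_raw := PySem.Str.slice (PySem.Str.strip ((List.lookup "other_detail" r).getD "")) none (some 120)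
        let od : Option String := if PySem.Str.lower cat = "other" then some od_raw else none
        if PySem.Str.lower cat = "other" ∧ od.getD "" = "" then groups
        else
          let k := pvRowKey cat od
          if PySem.Str.lower cat = "other" then
            let label := od.getD ""
            groups.modify k [] (fun ls => ls ++ ["Other (\"" ++ label ++ "\")"])
          else
            groups.modify k [] (fun ls => ls ++ [cat])) d
    = (l.filterMap pvEntry?).foldl (fun d p => d.modify p.1 [] (fun x => x ++ [p.2])) d := by
  induction l generalizing d with
  | nil => rfl
  | cons r l ih =>
    simp only [List.foldl_cons, List.filterMap_cons]
    rw [pv_a_step]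
    rcases h : pvEntry? r with _ | p <;> simp [ih]

theorem pv_b_rows (l : List (List (String × String))) (acc : List (String × String)) :
    l.foldl (fun rows r =>
      let cat := PySem.Str.strip ((List.lookup "category" r).getD "")
      if cat = "" then rows
      else
        let low := PySem.Str.lower cat
        let od := PySem.Str.slice (PySem.Str.strip ((List.lookup "other_detail" r).getD "")) none (some 120)
        if low = "other" then
          if od = "" then rows
          else rows ++ [("other::" ++ PySem.Str.lower (PySem.Str.strip od), "Other (\"" ++ od ++ "\")")]
        else
          rows ++ [("cat::" ++ low, cat)]) acc
    = acc ++ l.filterMap pvEntry? := by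
  induction l generalizing acc with
  | nil => simp
  | cons r l ih =>
    simp only [List.foldl_cons, List.filterMap_cons]
    rw [pv_b_step]
    rcases h : pvEntry? r with _ | p <;> simp [ih]

-- ===== VERDICT (by name: the statement is the Claim_ definition above) =====
theorem duplicate_budget_lines_user_message_spec : Claim_equal_duplicate_budget_lines_user_message := by
  intro submitted _
  show duplicate_budget_lines_user_message submitted = duplicate_budget_lines_user_message_alt submitted
  unfold duplicate_budget_lines_user_message duplicate_budget_lines_user_message_alt
  dsimp only
  rw [pv_a_fold, pv_b_rows, List.nil_append]
  set rows := submitted.filterMap pvEntry? with hrows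
  set groups := rows.foldl (fun d p => d.modify p.1 [] (fun x => x ++ [p.2])) PySem.Dict.empty with hgroups
  have hget : ∀ k, groups.getD k [] = (rows.filter (fun p => p.1 == k)).map (fun p => p.2) := by
    intro k
    rw [hgroups]
    simpa using PySem.Dict.getD_foldl_modify_append rows PySem.Dict.empty k
  have hnodup : groups.keys.Nodup := by
    rw [hgroups]
    exact PySem.Dict.nodup_keys_foldl_modify_key rows (fun p => p.1) [] (fun d p => fun x => x ++ [p.2]) PySem.Dict.empty (by simp)
  have hkeys : groups.keys = PySem.Set.ofList (rows.map (fun p => p.1)) := by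
    rw [hgroups]
    rw [PySem.Dict.keys_foldl_modify_key rows (fun p => p.1) [] (fun d p => fun x => x ++ [p.2]) PySem.Dict.empty]
    rw [PySem.Set.ofList_eq_foldl]
    rfl
  have hitems := PySem.Dict.items_eq_map_keys groups hnodup []
  have hsorted : PySem.List.sorted groups.items (fun kv => kv.1)
      = (PySem.List.sorted (PySem.Set.ofList (rows.map (fun p => p.1))) (fun x => x)).map
          (fun k => (k, groups.getD k [])) := by
    apply PySem.List.sorted_eq_of_perm_of_pairwise_lt
    · rw [hitems, hkeys]
      exact (PySem.List.sorted_perm _ _ _).map _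
    · rw [List.pairwise_map]
      exact PySem.List.sorted_ofList_pairwise_lt (rows.map (fun p => p.1))
  rw [hsorted, List.foldl_map]
  dsimp only
  simp only [hget]
  have hfab : (fun (x : List String) (y : String) =>
      if (List.map (fun p => p.2) (List.filter (fun p => p.1 == y) rows)).length < 2 then x
      else
        if PySem.Str.startswith y "other::" = true then
          x ++ ["• " ++ PySem.List.pyGetD (List.map (fun p => p.2) (List.filter (fun p => p.1 == y) rows)) 0 "" ++ ": " ++ PySem.Int.toStr ((List.map (fun p => p.2) (List.filter (fun p => p.1 == y) rows)).length : Int) ++ " rows share this same Other label. Merge the amounts into one row, or type a different label on the extra row so each Other line is distinct."]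
        else
          x ++ ["• " ++ PySem.List.pyGetD (List.map (fun p => p.2) (List.filter (fun p => p.1 == y) rows)) 0 "" ++ ": " ++ PySem.Int.toStr ((List.map (fun p => p.2) (List.filter (fun p => p.1 == y) rows)).length : Int) ++ " rows list this category. Keep one row (merge limits into a single total if needed) or change one row to a different category."])
    = (fun (blocks : List String) (k : String) =>
      if 2 ≤ (List.map (fun p => p.2) (List.filter (fun p => p.1 == k) rows)).length then
        if PySem.Str.startswith k "other::" = true then
          blocks ++ ["• " ++ PySem.List.pyGetD (List.map (fun p => p.2) (List.filter (fun p => p.1 == k) rows)) 0 "" ++ ": " ++ PySem.Int.toStr ((List.map (fun p => p.2) (List.filter (fun p => p.1 == k) rows)).length : Int) ++ " rows share this same Other label. Merge the amounts into one row, or type a different label on the extra row so each Other line is distinct."]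
        else
          blocks ++ ["• " ++ PySem.List.pyGetD (List.map (fun p => p.2) (List.filter (fun p => p.1 == k) rows)) 0 "" ++ ": " ++ PySem.Int.toStr ((List.map (fun p => p.2) (List.filter (fun p => p.1 == k) rows)).length : Int) ++ " rows list this category. Keep one row (merge limits into a single total if needed) or change one row to a different category."]
      else blocks) := by
    funext acc k
    by_cases hn : (List.map (fun p => p.2) (List.filter (fun p => p.1 == k) rows)).length < 2
    · have h2 : ¬ 2 ≤ (List.map (fun p => p.2) (List.filter (fun p => p.1 == k) rows)).length := by omega
      simp only [if_pos hn, if_neg h2]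
    · have h2 : 2 ≤ (List.map (fun p => p.2) (List.filter (fun p => p.1 == k) rows)).length := by omega
      simp only [if_neg hn, if_pos h2]
  rw [hfab]
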